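-- pv_equiv track=rewrite | github.com/loeschn/Video-Game-Recommender | src/pymongo_functions.py | make_id_list
-- ===== SOURCE A (Python) =====
-- def make_id_list(column):
--     """Making a list of unique ids in a given column"""
--     id_list=[]
--     for item in column:
--         if type(item)==list:
--             for entry in item:
--                 if entry not in id_list:
--                     id_list.append(entry)
--     (id_list.sort())
--     return id_list
-- ===== SOURCE B (Python) =====
-- def make_id_list(column):
--     """Making a list of unique ids in a given column"""
--     flat = []
--     for item in column:
--         if type(item) == list:
--             flat.extend(item)
--     flat.sort()
--     result = []
--     for x in flat:
--         if not result or x != result[-1]: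
--             result.append(x)
--     return result
-- ===== Notes on version B (the rewrite author's own statement) =====
-- stated objective: faster
-- what changed: Replaces the quadratic membership-scan dedup (entry not in id_list) followed by a sort with flatten once, sort once, then a single linear pass dropping adjacent duplicates.
import Mathlib
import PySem

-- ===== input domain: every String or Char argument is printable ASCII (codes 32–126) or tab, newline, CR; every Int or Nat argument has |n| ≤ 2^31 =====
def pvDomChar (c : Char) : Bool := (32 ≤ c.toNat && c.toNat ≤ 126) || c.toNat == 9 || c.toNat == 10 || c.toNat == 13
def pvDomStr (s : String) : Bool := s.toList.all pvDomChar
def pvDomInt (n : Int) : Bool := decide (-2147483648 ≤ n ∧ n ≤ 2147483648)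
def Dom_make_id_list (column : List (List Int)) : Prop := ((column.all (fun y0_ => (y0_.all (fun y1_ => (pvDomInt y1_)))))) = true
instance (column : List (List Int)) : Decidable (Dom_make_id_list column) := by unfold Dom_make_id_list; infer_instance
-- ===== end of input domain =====

-- B replaces A's quadratic membership-scan dedup followed by a sort with flatten-once,
-- sort-once, then one linear pass dropping adjacent duplicates (faster: O(n log n) vs O(n^2)).

-- ===== PORT A =====
-- inner body: `if entry not in id_list: id_list.append(entry)`
def dedupStep (id_list : List Int) (entry : Int) : List Int :=
  if entry ∈ id_list then id_list else id_list ++ [entry]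

-- `type(item) == list` is always true at type List (List Int)
def make_id_list (column : List (List Int)) : List Int :=
  let id_list := column.foldl (fun id_list item => item.foldl dedupStep id_list) []
  PySem.List.sorted id_list (fun x => x) false

-- ===== PORT B =====
-- loop body: `if not result or x != result[-1]: result.append(x)`
def uniqStep (result : List Int) (x : Int) : List Int :=
  if result = [] ∨ PySem.List.pyGet? result (-1) ≠ some x then result ++ [x] else result

def make_id_list_alt (column : List (List Int)) : List Int :=
  let flat := column.foldl (fun flat item => flat ++ item) []
  (PySem.List.sorted flat (fun x => x) false).foldl uniqStep []

-- ===== PRECONDITION & SPEC =====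
def Spec_make_id_list (column : List (List Int)) (out : List Int) : Prop := out = make_id_list_alt column
instance (column : List (List Int)) (out : List Int) : Decidable (Spec_make_id_list column out) := by unfold Spec_make_id_list; infer_instance

-- ===== CLAIM (what is proved, stated in full; the proofs are below) =====
def Claim_equal_make_id_list : Prop := ∀ (column : List (List Int)), Dom_make_id_list column → Spec_make_id_list column (make_id_list column)

-- ===== LEMMAS AND PROOFS =====

lemma pyGet_neg_one (l : List Int) : PySem.List.pyGet? l (-1) = l.getLast? := by
  simp [PySem.List.pyGet?, PySem.List.pyIdx?, List.getLast?_eq_getElem?]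
  cases l <;> simp

lemma uniqStep_eq (res : List Int) (x : Int) :
    uniqStep res x = if res.getLast? = some x then res else res ++ [x] := by
  unfold uniqStep
  rw [pyGet_neg_one]
  by_cases h : res.getLast? = some x
  · have hne : res ≠ [] := by intro he; subst he; simp at h
    simp [h, hne]
  · simp [h]

lemma le_getLast_of_pairwise_lt {acc : List Int} {a m : Int}
    (hp : acc.Pairwise (· < ·)) (ha : a ∈ acc) (hm : acc.getLast? = some m) : a ≤ m := by
  induction acc with
  | nil => simp at ha
  | cons b t ih =>
    cases t with
    | nil =>
      simp at ha hm; omega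
    | cons c u =>
      rw [List.getLast?_cons_cons] at hm
      rcases List.mem_cons.mp ha with rfl | hat
      · have hbm : a < m := (List.pairwise_cons.mp hp).1 m
          (List.mem_of_getLast? (l := c :: u) hm)
        omega
      · exact ih (List.pairwise_cons.mp hp).2 hat hm

lemma uniq_inv (s : List Int) : ∀ acc : List Int, s.Pairwise (· ≤ ·) → acc.Pairwise (· < ·) →
    (∀ m, acc.getLast? = some m → ∀ y ∈ s, m ≤ y) →
    (s.foldl uniqStep acc).Pairwise (· < ·) ∧
      (∀ z, z ∈ s.foldl uniqStep acc ↔ z ∈ acc ∨ z ∈ s) := by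
  induction s with
  | nil => intro acc _ hacc _; simpa using hacc
  | cons x t ih =>
    intro acc hs hacc hlink
    have hxt : ∀ y ∈ t, x ≤ y := (List.pairwise_cons.mp hs).1
    have ht : t.Pairwise (· ≤ ·) := (List.pairwise_cons.mp hs).2
    rw [List.foldl_cons, uniqStep_eq]
    by_cases h : acc.getLast? = some x
    · rw [if_pos h]
      have hx_mem : x ∈ acc := List.mem_of_getLast? h
      obtain ⟨hp, hmem⟩ := ih acc ht hacc
        (fun m hm y hy => by rw [h] at hm; injection hm with he; subst he; exact hxt y hy)
      refine ⟨hp, fun z => ?_⟩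
      rw [hmem z]
      constructor
      · rintro (hz | hz)
        · exact Or.inl hz
        · exact Or.inr (List.mem_cons_of_mem _ hz)
      · rintro (hz | hz)
        · exact Or.inl hz
        · rcases List.mem_cons.mp hz with rfl | hz'
          · exact Or.inl hx_mem
          · exact Or.inr hz'
    · rw [if_neg h]
      have hp' : (acc ++ [x]).Pairwise (· < ·) := by
        rw [List.pairwise_append]
        refine ⟨hacc, by simp, fun a ha b hb => ?_⟩
        rw [List.mem_singleton] at hb; subst hb
        have hne' : acc ≠ [] := by rintro rfl; simp at ha
        obtain ⟨m, hm⟩ := Option.isSome_iff_exists.mp (List.getLast?_isSome.mpr hne')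
        have ham : a ≤ m := le_getLast_of_pairwise_lt hacc ha hm
        have hmb : m ≤ b := hlink m hm b List.mem_cons_self
        have hne : m ≠ b := fun he => h (he ▸ hm)
        omega
      have hlink' : ∀ m, (acc ++ [x]).getLast? = some m → ∀ y ∈ t, m ≤ y := by
        intro m hm y hy
        rw [List.getLast?_concat] at hm
        injection hm with he; subst he
        exact hxt y hy
      obtain ⟨hp, hmem⟩ := ih (acc ++ [x]) ht hp' hlink'
      refine ⟨hp, fun z => ?_⟩
      rw [hmem z]
      simp only [List.mem_append, List.mem_cons]
      tauto

lemma dedup_inv (s : List Int) : ∀ acc : List Int, acc.Nodup →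
    (s.foldl dedupStep acc).Nodup ∧
      (∀ z, z ∈ s.foldl dedupStep acc ↔ z ∈ acc ∨ z ∈ s) := by
  induction s with
  | nil => intro acc hacc; simpa using hacc
  | cons e t ih =>
    intro acc hacc
    rw [List.foldl_cons]
    have hstep : dedupStep acc e = if e ∈ acc then acc else acc ++ [e] := rfl
    rw [hstep]
    by_cases h : e ∈ acc
    · rw [if_pos h]
      obtain ⟨hn, hmem⟩ := ih acc hacc
      refine ⟨hn, fun z => ?_⟩
      rw [hmem z]
      constructor
      · rintro (hz | hz)
        · exact Or.inl hz
        · exact Or.inr (List.mem_cons_of_mem _ hz)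
      · rintro (hz | hz)
        · exact Or.inl hz
        · rcases List.mem_cons.mp hz with rfl | hz'
          · exact Or.inl h
          · exact Or.inr hz'
    · rw [if_neg h]
      have hacc' : (acc ++ [e]).Nodup := by
        simp [List.nodup_append, hacc]
        exact fun a ha he => h (he ▸ ha)
      obtain ⟨hn, hmem⟩ := ih (acc ++ [e]) hacc'
      refine ⟨hn, fun z => ?_⟩
      rw [hmem z]
      simp only [List.mem_append, List.mem_cons]
      tauto

lemma foldl_append_flatten (c : List (List Int)) : ∀ acc : List Int,
    c.foldl (fun flat item => flat ++ item) acc = acc ++ c.flatten := by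
  induction c with
  | nil => simp
  | cons h t ih => intro acc; simp [ih]

lemma foldl_dedup_flatten (c : List (List Int)) :
    c.foldl (fun id_list item => item.foldl dedupStep id_list) [] =
      c.flatten.foldl dedupStep [] := by
  rw [List.foldl_flatten]

-- ===== VERDICT (by name: the statement is the Claim_ definition above) =====
theorem make_id_list_spec : Claim_equal_make_id_list := by
  intro column _
  unfold Spec_make_id_list make_id_list make_id_list_alt
  rw [foldl_dedup_flatten, foldl_append_flatten]
  simp only [List.nil_append]
  set F := column.flatten with hF
  set S := PySem.List.sorted F (fun x => x) false with hS
  have hSp : S.Pairwise (· ≤ ·) := by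
    simpa using PySem.List.sorted_pairwise (xs := F) (key := fun x => x)
  obtain ⟨hUp, hUmem⟩ := uniq_inv S [] hSp (by simp) (by simp)
  obtain ⟨hDn, hDmem⟩ := dedup_inv F [] (by simp)
  set U := S.foldl uniqStep [] with hU
  set D := F.foldl dedupStep [] with hD
  have hUn : U.Nodup := hUp.imp (fun h => ne_of_lt h)
  have hperm : U.Perm D := by
    refine List.perm_of_nodup_nodup_toFinset_eq hUn hDn ?_
    ext z
    simp only [List.mem_toFinset]
    rw [hUmem z, hDmem z]
    simp only [List.not_mem_nil, false_or]
    rw [hS, PySem.List.mem_sorted]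
  exact PySem.List.sorted_eq_of_perm_of_pairwise_lt _ _ _ hperm hUp
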